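-- pv_equiv track=rewrite | github.com/amerelsamman/Compostability_Model_II | databasegeneration_filtered.py | _generate_limited_exploration_combinations
-- ===== SOURCE A (Python) =====
-- from typing import List, Tuple, Dict, Any
-- from itertools import combinations
--
-- def _generate_limited_exploration_combinations(polymer_groups: Dict, polymer_types: List[str],
--                                              n_polymers: int, max_remaining: int) -> List[List[Tuple[str, str]]]:
--     """Generate limited exploration combinations."""
--     combinations_list = []
--
--     # Generate combinations of polymer types
--     for polymer_combo in combinations(polymer_types, n_polymers):
--         # For each polymer type, select one material
--         material_combinations = []
--
--         for polymer_type in polymer_combo: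
--             if polymer_type in polymer_groups:
--                 materials = polymer_groups[polymer_type]
--                 # Select first material from each polymer type
--                 if materials:
--                     material_combinations.append(materials[0])
--
--         if len(material_combinations) == n_polymers:
--             combinations_list.append(material_combinations)
--
--     return combinations_list[:max_remaining]
-- ===== SOURCE B (Python) =====
-- from itertools import combinations
--
-- def _generate_limited_exploration_combinations(polymer_groups, polymer_types,
--                                                n_polymers, max_remaining):
--     """Filter once, then combine: first materials of the valid types, in order."""
--     # pass 1: the first material of every polymer type that is present and non-empty
--     valid_firsts = [polymer_groups[t][0] for t in polymer_types
--                     if t in polymer_groups and polymer_groups[t]]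
--     # pass 2: every n_polymers-combination of those materials, capped by the slice
--     return [list(c) for c in combinations(valid_firsts, n_polymers)][:max_remaining]
-- ===== Notes on version B (the rewrite author's own statement) =====
-- stated objective: simpler
-- what changed: B hoists the presence/non-emptiness filtering into one preliminary pass that builds the list of first materials, then takes combinations of that filtered list directly, removing A's per-combination inner lookup loop and length check.
import Mathlib
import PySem

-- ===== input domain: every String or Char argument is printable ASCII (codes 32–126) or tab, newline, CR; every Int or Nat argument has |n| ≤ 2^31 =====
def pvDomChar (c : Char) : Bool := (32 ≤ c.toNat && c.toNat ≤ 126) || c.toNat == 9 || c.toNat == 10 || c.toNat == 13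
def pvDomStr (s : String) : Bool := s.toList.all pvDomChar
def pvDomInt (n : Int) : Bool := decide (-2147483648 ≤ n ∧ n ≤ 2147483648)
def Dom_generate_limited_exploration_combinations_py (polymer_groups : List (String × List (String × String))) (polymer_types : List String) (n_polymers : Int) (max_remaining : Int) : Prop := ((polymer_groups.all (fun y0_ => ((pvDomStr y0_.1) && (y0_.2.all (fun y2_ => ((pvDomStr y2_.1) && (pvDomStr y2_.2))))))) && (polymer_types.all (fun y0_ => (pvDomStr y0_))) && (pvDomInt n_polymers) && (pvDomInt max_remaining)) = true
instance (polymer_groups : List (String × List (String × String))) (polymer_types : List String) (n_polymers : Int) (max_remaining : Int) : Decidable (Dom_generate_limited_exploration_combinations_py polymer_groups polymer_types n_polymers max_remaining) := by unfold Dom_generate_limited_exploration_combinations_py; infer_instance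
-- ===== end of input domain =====

-- B hoists the validity filtering into one preliminary pass over polymer_types and then
-- combines the filtered first-materials list directly (objective: simpler).


-- itertools.combinations(xs, r) in Python's (index-lexicographic) order; shared library
-- helper, used by both ports exactly where the Python calls itertools.combinations.
def pyCombinations {α : Type} : List α → Nat → List (List α)
  | _, 0 => [[]]
  | [], _ + 1 => []
  | x :: rest, n + 1 =>
      (pyCombinations rest n).map (fun c => x :: c) ++ pyCombinations rest (n + 1)

-- ===== PORT A =====
def generate_limited_exploration_combinations_py (polymer_groups : List (String × List (String × String))) (polymer_types : List String) (n_polymers : Int) (max_remaining : Int) : List (List (String × String)) :=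
  -- combinations_list = [] ; for polymer_combo in combinations(polymer_types, n_polymers): …
  let combinations_list :=
    (pyCombinations polymer_types n_polymers.toNat).foldl
      (fun combinations_list polymer_combo =>
        -- material_combinations = [] ; for polymer_type in polymer_combo: …
        let material_combinations :=
          polymer_combo.foldl
            (fun material_combinations polymer_type =>
              -- 'polymer_type in polymer_groups' + 'polymer_groups[polymer_type]' = first match
              match polymer_groups.find? (fun kv => kv.1 == polymer_type) with
              | some (_, materials) =>
                  -- if materials: material_combinations.append(materials[0])
                  match materials with
                  | [] => material_combinations
                  | m0 :: _ => material_combinations ++ [m0]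
              | none => material_combinations)
            []
        if (material_combinations.length : Int) = n_polymers then
          combinations_list ++ [material_combinations]
        else combinations_list)
      []
  PySem.List.slice combinations_list none (some max_remaining)

-- ===== PORT B =====
def generate_limited_exploration_combinations_py_alt (polymer_groups : List (String × List (String × String))) (polymer_types : List String) (n_polymers : Int) (max_remaining : Int) : List (List (String × String)) :=
  -- valid_firsts = [groups[t][0] for t in polymer_types if t in groups and groups[t]]
  let valid_firsts :=
    polymer_types.filterMap
      (fun t =>
        match polymer_groups.find? (fun kv => kv.1 == t) with
        | some (_, m0 :: _) => some m0
        | _ => none)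
  -- [list(c) for c in combinations(valid_firsts, n_polymers)][:max_remaining]
  PySem.List.slice (pyCombinations valid_firsts n_polymers.toNat) none (some max_remaining)

-- ===== PRECONDITION & SPEC =====
-- Python's combinations(…, r) raises ValueError for negative r, so A (and B) raise iff n_polymers < 0.
def Pre_generate_limited_exploration_combinations_py (polymer_groups : List (String × List (String × String))) (polymer_types : List String) (n_polymers : Int) (max_remaining : Int) : Prop := 0 ≤ n_polymers
instance (polymer_groups : List (String × List (String × String))) (polymer_types : List String) (n_polymers : Int) (max_remaining : Int) : Decidable (Pre_generate_limited_exploration_combinations_py polymer_groups polymer_types n_polymers max_remaining) := by unfold Pre_generate_limited_exploration_combinations_py; infer_instance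

def pvWitness_generate_limited_exploration_combinations_py : (List (String × List (String × String))) × List String × Int × Int :=
  ([("PLA", [("PLA-1", "bio"), ("PLA-2", "bio")]), ("PHA", [("PHA-1", "bio")]), ("PET", [])],
   ["PLA", "PHA", "PET", "PBS"], 2, 5)

def Spec_generate_limited_exploration_combinations_py (polymer_groups : List (String × List (String × String))) (polymer_types : List String) (n_polymers : Int) (max_remaining : Int) (out : List (List (String × String))) : Prop := out = generate_limited_exploration_combinations_py_alt polymer_groups polymer_types n_polymers max_remaining
instance (polymer_groups : List (String × List (String × String))) (polymer_types : List String) (n_polymers : Int) (max_remaining : Int) (out : List (List (String × String))) : Decidable (Spec_generate_limited_exploration_combinations_py polymer_groups polymer_types n_polymers max_remaining out) := by unfold Spec_generate_limited_exploration_combinations_py; infer_instance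

-- ===== CLAIM (what is proved, stated in full; the proofs are below) =====
def Claim_equal_generate_limited_exploration_combinations_py : Prop := ∀ (polymer_groups : List (String × List (String × String))) (polymer_types : List String) (n_polymers : Int) (max_remaining : Int), Dom_generate_limited_exploration_combinations_py polymer_groups polymer_types n_polymers max_remaining → Pre_generate_limited_exploration_combinations_py polymer_groups polymer_types n_polymers max_remaining → Spec_generate_limited_exploration_combinations_py polymer_groups polymer_types n_polymers max_remaining (generate_limited_exploration_combinations_py polymer_groups polymer_types n_polymers max_remaining)

-- ===== LEMMAS AND PROOFS =====

-- every member of pyCombinations xs n has length n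
theorem length_of_mem_pyCombinations {α : Type} (xs : List α) (n : Nat) (c : List α)
    (h : c ∈ pyCombinations xs n) : c.length = n := by
  induction xs generalizing n c with
  | nil =>
      cases n with
      | zero => simp [pyCombinations] at h; simp [h]
      | succ n => simp [pyCombinations] at h
  | cons x rest ih =>
      cases n with
      | zero => simp [pyCombinations] at h; simp [h]
      | succ n =>
          simp [pyCombinations] at h
          rcases h with ⟨c', hc', rfl⟩ | h
          · simp [ih _ _ hc']
          · exact ih _ _ h

-- A's inner loop over a combo is filterMap of the first-material lookup
theorem inner_foldl_eq_filterMap (pg : List (String × List (String × String)))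
    (combo : List String) (acc : List (String × String)) :
    combo.foldl
        (fun mc t =>
          match pg.find? (fun kv => kv.1 == t) with
          | some (_, materials) =>
              match materials with
              | [] => mc
              | m0 :: _ => mc ++ [m0]
          | none => mc) acc
      = acc ++ combo.filterMap
          (fun t =>
            match pg.find? (fun kv => kv.1 == t) with
            | some (_, m0 :: _) => some m0
            | _ => none) := by
  induction combo generalizing acc with
  | nil => simp
  | cons t rest ih =>
      cases h : pg.find? (fun kv => kv.1 == t) with
      | none => simp [List.foldl_cons, h, ih]
      | some kv =>
          obtain ⟨k, mats⟩ := kv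
          cases mats <;> simp [List.foldl_cons, h, ih]

-- the key pass-commutation: filtering full-length combos of the raw list and mapping each
-- through filterMap f equals taking combos of the already-filtered list
theorem filter_map_pyCombinations {α β : Type} (f : α → Option β) (xs : List α) (n : Nat) :
    ((pyCombinations xs n).filter (fun c => (c.filterMap f).length = n)).map
        (fun c => c.filterMap f)
      = pyCombinations (xs.filterMap f) n := by
  induction xs generalizing n with
  | nil =>
      cases n with
      | zero => simp [pyCombinations]
      | succ n => simp [pyCombinations]
  | cons x rest ih =>
      cases n with
      | zero => simp [pyCombinations]
      | succ n =>
          cases hx : f x with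
          | some v =>
              simp only [pyCombinations, List.filter_append, List.map_append,
                List.filter_map, List.filterMap_cons, hx]
              rw [← ih n, ← ih (n + 1)]
              congr 1
              rw [List.map_map, List.map_map]
              have hpc : ∀ c ∈ pyCombinations rest n,
                  ((fun c => decide ((List.filterMap f c).length = n + 1)) ∘ (fun c => x :: c)) c
                    = decide ((List.filterMap f c).length = n) := by
                intro c _
                simp [hx]
              rw [List.filter_congr hpc]
              apply List.map_congr_left
              intro c _
              simp [hx]
          | none =>
              simp only [pyCombinations, List.filter_append, List.map_append,
                List.filter_map, List.filterMap_cons, hx]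
              rw [← ih (n + 1)]
              have hnil :
                  (pyCombinations rest n).filter
                      ((fun c => decide ((c.filterMap f).length = n + 1)) ∘ (fun c => x :: c))
                    = [] := by
                apply List.filter_eq_nil_iff.mpr
                intro c hc
                have hlen := length_of_mem_pyCombinations rest n c hc
                have : (List.filterMap f (x :: c)).length ≤ n := by
                  rw [List.filterMap_cons, hx]
                  calc (List.filterMap f c).length ≤ c.length := List.length_filterMap_le f c
                    _ = n := hlen
                simp only [Function.comp]
                simpa using Nat.ne_of_lt (Nat.lt_succ_of_le this)
              rw [hnil]
              simp

-- ===== VERDICT (by name: the statement is the Claim_ definition above) =====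
theorem generate_limited_exploration_combinations_py_spec : Claim_equal_generate_limited_exploration_combinations_py := by
  intro polymer_groups polymer_types n_polymers max_remaining _hdom hpre
  unfold Spec_generate_limited_exploration_combinations_py
  unfold generate_limited_exploration_combinations_py generate_limited_exploration_combinations_py_alt
  set f : String → Option (String × String) :=
    fun t =>
      match polymer_groups.find? (fun kv => kv.1 == t) with
      | some (_, m0 :: _) => some m0
      | _ => none with hf
  have hinner : ∀ combo : List String,
      combo.foldl
        (fun mc t =>
          match polymer_groups.find? (fun kv => kv.1 == t) with
          | some (_, materials) =>
              match materials with
              | [] => mc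
              | m0 :: _ => mc ++ [m0]
          | none => mc) ([] : List (String × String))
        = combo.filterMap f := by
    intro combo
    have this := inner_foldl_eq_filterMap polymer_groups combo []
    simp only [List.nil_append] at this
    rw [this, hf]
  simp only [hinner]
  have hbody :
      (pyCombinations polymer_types n_polymers.toNat).foldl
        (fun acc combo =>
          if ((combo.filterMap f).length : Int) = n_polymers then acc ++ [combo.filterMap f]
          else acc) []
      = ((pyCombinations polymer_types n_polymers.toNat).filter
            (fun c => decide (((c.filterMap f).length : Int) = n_polymers))).map
          (fun c => c.filterMap f) := by
    simpa using PySem.List.foldl_append_ite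
      (l := pyCombinations polymer_types n_polymers.toNat)
      (p := fun c => ((c.filterMap f).length : Int) = n_polymers)
      (f := fun c => c.filterMap f) (acc := [])
  rw [hbody]
  have h0 : 0 ≤ n_polymers := hpre
  have hcond : ∀ c : List String,
      decide (((c.filterMap f).length : Int) = n_polymers)
        = decide ((c.filterMap f).length = n_polymers.toNat) := by
    intro c
    have : ((c.filterMap f).length : Int) = n_polymers ↔ (c.filterMap f).length = n_polymers.toNat := by
      omega
    simp [this]
  simp only [hcond]
  rw [filter_map_pyCombinations f polymer_types n_polymers.toNat]
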